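-- pv_equiv track=rewrite | github.com/kmad1729/basic_ds | general_questions/dpv_prb_6_4.py | _get_word_markers
-- ===== SOURCE A (Python) =====
-- def is_valid_word(s):
--     words = {"i", "a", "it", "was", "the", "best", "of", "times",
--             "bed", "bath","and","beyond", "be", "tree", "about", "atrocious",
--             "at",}
--     return s in words
--
-- def _get_word_markers(s):
--     l_s = list(s)
--     util_arr = [False] * (len(l_s) + 1)
--     util_arr[0] = True
--     for i in range(len(util_arr)):
--         for j in range(1, i+1):
--             if util_arr[j-1]:
--                 if is_valid_word(''.join(l_s[j-1:i])):
--                     util_arr[i] = True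
--                     break
--     return util_arr
-- ===== SOURCE B (Python) =====
-- WORDS = ["i", "a", "it", "was", "the", "best", "of", "times",
--          "bed", "bath", "and", "beyond", "be", "tree", "about", "atrocious",
--          "at"]
--
-- def _get_word_markers(s):
--     util = [True]
--     for i in range(1, len(s) + 1):
--         util.append(any(len(w) <= i and util[i - len(w)] and s[i - len(w):i] == w
--                         for w in WORDS))
--     return util
-- ===== Notes on version B (the rewrite author's own statement) =====
-- stated objective: faster
-- what changed: Instead of scanning every split point j<i per position (quadratic in len(s)), B checks for each position only the 17 fixed dictionary words as suffixes, making the work per position constant.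
import Mathlib
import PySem

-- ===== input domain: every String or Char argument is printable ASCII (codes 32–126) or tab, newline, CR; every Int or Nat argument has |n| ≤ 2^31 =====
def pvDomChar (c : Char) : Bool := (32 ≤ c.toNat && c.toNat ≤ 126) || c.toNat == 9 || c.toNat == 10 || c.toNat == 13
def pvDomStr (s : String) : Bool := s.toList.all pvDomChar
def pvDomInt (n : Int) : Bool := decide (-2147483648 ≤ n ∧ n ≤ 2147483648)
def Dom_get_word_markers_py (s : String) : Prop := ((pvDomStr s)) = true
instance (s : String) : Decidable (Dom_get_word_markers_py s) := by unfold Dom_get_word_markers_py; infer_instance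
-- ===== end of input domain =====

-- B replaces A's per-position scan of all split points by a per-position scan of the
-- 17 fixed dictionary words checked as suffixes (objective: faster, O(n·|dict|) vs O(n²)).

-- ===== PORT A =====
-- the word set of is_valid_word, as lists of characters (''.join of a char-list slice is exactly that string)
def pvWords : List (List Char) :=
  [['i'], ['a'], ['i','t'], ['w','a','s'], ['t','h','e'], ['b','e','s','t'],
   ['o','f'], ['t','i','m','e','s'], ['b','e','d'], ['b','a','t','h'],
   ['a','n','d'], ['b','e','y','o','n','d'], ['b','e'], ['t','r','e','e'],
   ['a','b','o','u','t'], ['a','t','r','o','c','i','o','u','s'], ['a','t']]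

def is_valid_word_port (t : List Char) : Bool :=
  (PySem.Set.ofList pvWords).contains t

-- inner loop of A: 'for j in range(1, i+1): if util_arr[j-1]: if is_valid_word(s[j-1:i]): util_arr[i] = True; break'
def pvAInner (l_s : List Char) (i : Int) (util : List Bool) : List Int → List Bool
  | [] => util
  | j :: js =>
    if PySem.List.pyGetD util (j - 1) false then
      if is_valid_word_port (PySem.List.slice l_s (some (j - 1)) (some i)) then
        PySem.List.pySetD util i true
      else pvAInner l_s i util js
    else pvAInner l_s i util js

def get_word_markers_py (s : String) : List Bool :=
  let l_s := s.toList
  let util0 := PySem.List.pySetD (List.replicate (l_s.length + 1) false) 0 true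
  (PySem.List.pyRange 0 (util0.length : Int) 1).foldl
    (fun util i => pvAInner l_s i util (PySem.List.pyRange 1 (i + 1) 1)) util0

-- ===== PORT B =====
def get_word_markers_py_alt (s : String) : List Bool :=
  (PySem.List.pyRange 1 ((s.toList.length : Int) + 1) 1).foldl
    (fun util i =>
      util ++ [pvWords.any (fun w =>
        decide ((w.length : Int) ≤ i) &&
        PySem.List.pyGetD util (i - (w.length : Int)) false &&
        (PySem.List.slice s.toList (some (i - (w.length : Int))) (some i) == w))])
    [true]

-- ===== PRECONDITION & SPEC =====
def Spec_get_word_markers_py (s : String) (out : List Bool) : Prop := out = get_word_markers_py_alt s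
instance (s : String) (out : List Bool) : Decidable (Spec_get_word_markers_py s out) := by unfold Spec_get_word_markers_py; infer_instance

-- ===== CLAIM (what is proved, stated in full; the proofs are below) =====
def Claim_equal_get_word_markers_py : Prop := ∀ (s : String), Dom_get_word_markers_py s → Spec_get_word_markers_py s (get_word_markers_py s)

-- ===== LEMMAS AND PROOFS =====

-- the per-position condition computed by A's inner loop (scan over split points j)
def pvFA (cs : List Char) (u : List Bool) : Bool :=
  (PySem.List.pyRange 1 ((u.length : Int) + 1) 1).any (fun j =>
    PySem.List.pyGetD u (j - 1) false &&
    is_valid_word_port (PySem.List.slice cs (some (j - 1)) (some (u.length : Int))))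

-- the per-position condition computed by B (scan over dictionary words as suffixes)
def pvFB (cs : List Char) (u : List Bool) : Bool :=
  pvWords.any (fun w =>
    decide ((w.length : Int) ≤ ((u.length : Int))) &&
    PySem.List.pyGetD u ((u.length : Int) - (w.length : Int)) false &&
    (PySem.List.slice cs (some ((u.length : Int) - (w.length : Int))) (some (u.length : Int)) == w))

-- both programs grow the marker list one position at a time
def pvGrow (cs : List Char) (f : List Char → List Bool → Bool) (u : List Bool) : Nat → List Bool
  | 0 => u
  | k + 1 => pvGrow cs f (u ++ [f cs u]) k

theorem pvGetD_append_left (u v : List Bool) (k : Int) (d : Bool)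
    (h0 : 0 ≤ k) (h1 : k < u.length) :
    PySem.List.pyGetD (u ++ v) k d = PySem.List.pyGetD u k d := by
  rw [PySem.List.pyGetD_eq_getElem _ _ h0 (by simp; omega),
      PySem.List.pyGetD_eq_getElem _ _ h0 h1,
      List.getElem_append_left (by omega)]

theorem pvSet_append (u : List Bool) (m : Nat) (hm : 0 < m) :
    (u ++ List.replicate m false).set u.length true = u ++ true :: List.replicate (m-1) false := by
  obtain ⟨m, rfl⟩ : ∃ m', m = m' + 1 := ⟨m - 1, by omega⟩
  simp [List.replicate_succ]

-- A's inner loop on a state 'decided prefix u ++ still-false tail' computes 'any' of its per-j tests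
theorem pvInner_eq (cs : List Char) (u : List Bool) (m : Nat) (js : List Int)
    (hm : 0 < m) (hjs : ∀ j ∈ js, 1 ≤ j ∧ j ≤ (u.length : Int)) :
    pvAInner cs (u.length : Int) (u ++ List.replicate m false) js
      = u ++ ((js.any fun j =>
          PySem.List.pyGetD u (j - 1) false &&
          is_valid_word_port (PySem.List.slice cs (some (j - 1)) (some (u.length : Int))))
          :: List.replicate (m - 1) false) := by
  induction js with
  | nil =>
    obtain ⟨m, rfl⟩ : ∃ m', m = m' + 1 := ⟨m - 1, by omega⟩
    simp [pvAInner, List.replicate_succ]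
  | cons j js ih =>
    obtain ⟨h1, h2⟩ := hjs j (by simp)
    have hget : PySem.List.pyGetD (u ++ List.replicate m false) (j-1) false
        = PySem.List.pyGetD u (j-1) false :=
      pvGetD_append_left _ _ _ _ (by omega) (by omega)
    have ih' := ih (fun j h => hjs j (by simp [h]))
    simp only [pvAInner, hget, List.any_cons]
    cases hA : PySem.List.pyGetD u (j-1) false
    · simpa using ih'
    · cases hB : is_valid_word_port (PySem.List.slice cs (some (j-1)) (some (u.length:Int)))
      · simpa [hB] using ih'
      · simp only [if_true, Bool.true_and, Bool.true_or]
        rw [PySem.List.pySetD_of_nonneg _ _ (by omega)]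
        simpa using pvSet_append u m hm

-- A's outer loop, from a fully decided prefix u onward, is pvGrow of the per-position test pvFA
theorem pvGrowA (cs : List Char) (k : Nat) (u : List Bool) (hu : 0 < u.length) :
    (PySem.List.pyRange (u.length : Int) ((u.length : Int) + k) 1).foldl
      (fun util i => pvAInner cs i util (PySem.List.pyRange 1 (i + 1) 1))
      (u ++ List.replicate k false)
      = pvGrow cs pvFA u k := by
  induction k generalizing u with
  | zero => rw [PySem.List.pyRange_one_eq_nil (by omega)]; simp [pvGrow]
  | succ k ih =>
    rw [PySem.List.pyRange_one_cons (by omega), List.foldl_cons]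
    rw [pvInner_eq cs u (k+1) _ (by omega)
        (fun j hj => by rw [PySem.List.mem_pyRange_one] at hj; omega)]
    have hstate : u ++ ((PySem.List.pyRange 1 ((u.length : Int) + 1) 1).any fun j =>
          PySem.List.pyGetD u (j - 1) false &&
          is_valid_word_port (PySem.List.slice cs (some (j - 1)) (some (u.length : Int))))
          :: List.replicate (k + 1 - 1) false
        = (u ++ [pvFA cs u]) ++ List.replicate k false := by
      simp [pvFA]
    rw [hstate, pvGrow]
    have := ih (u ++ [pvFA cs u]) (by simp)
    simp only [List.length_append, List.length_cons, List.length_nil] at this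
    rw [← this]
    congr 2
    push_cast
    ring

-- B's loop shape is pvGrow of its per-position test (generic in the loop body)
theorem pvGrowB (cs : List Char) (f : List Char → List Bool → Bool)
    (body : List Bool → Int → List Bool)
    (hbody : ∀ u, body u (u.length : Int) = u ++ [f cs u])
    (k : Nat) (u : List Bool) :
    (PySem.List.pyRange (u.length : Int) ((u.length : Int) + k) 1).foldl body u
      = pvGrow cs f u k := by
  induction k generalizing u with
  | zero => rw [PySem.List.pyRange_one_eq_nil (by omega)]; rfl
  | succ k ih =>
    rw [PySem.List.pyRange_one_cons (by omega), List.foldl_cons, hbody, pvGrow]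
    have := ih (u ++ [f cs u])
    simp only [List.length_append, List.length_cons, List.length_nil] at this
    rw [← this]
    congr 2
    push_cast
    ring

theorem pvWords_nonempty : ∀ w ∈ pvWords, 0 < w.length := by decide

theorem pvValid_iff (w : List Char) : is_valid_word_port w = true ↔ w ∈ pvWords := by
  rw [is_valid_word_port, PySem.Set.contains_iff, PySem.Set.mem_ofList]

theorem pvSlice_length (cs : List Char) (t jn : Nat) (h1 : jn ≤ t) (h2 : t ≤ cs.length) :
    (PySem.List.slice cs (some (jn : Int)) (some (t : Int))).length + jn = t := by
  rw [PySem.List.slice_natCast]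
  simp
  omega

-- the heart: scanning split points (A) and scanning dictionary words as suffixes (B)
-- decide the same per-position condition
theorem pvStep_eq (cs : List Char) (u : List Bool)
    (_hu : 0 < u.length) (hle : u.length ≤ cs.length) :
    pvFA cs u = pvFB cs u := by
  rw [Bool.eq_iff_iff]
  simp only [pvFA, pvFB, List.any_eq_true, Bool.and_eq_true, decide_eq_true_eq, beq_iff_eq]
  constructor
  · rintro ⟨j, hj, hg, hv⟩
    rw [PySem.List.mem_pyRange_one] at hj
    have hj1 : (((j-1).toNat : Nat) : Int) = j - 1 := Int.toNat_of_nonneg (by omega)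
    rw [← hj1] at hg hv
    rw [pvValid_iff] at hv
    have hlen := pvSlice_length cs u.length (j-1).toNat (by omega) hle
    refine ⟨_, hv, ⟨?_, ?_⟩, ?_⟩
    · omega
    · rw [show (u.length : Int) -
          ((PySem.List.slice cs (some (((j-1).toNat : Nat) : Int)) (some (u.length : Int))).length : Int)
          = (((j-1).toNat : Nat) : Int) from by omega]
      exact hg
    · rw [show (u.length : Int) -
          ((PySem.List.slice cs (some (((j-1).toNat : Nat) : Int)) (some (u.length : Int))).length : Int)
          = (((j-1).toNat : Nat) : Int) from by omega]
  · rintro ⟨w, hw, ⟨hwle, hg⟩, heq⟩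
    have hwpos := pvWords_nonempty w hw
    refine ⟨(u.length : Int) - (w.length : Int) + 1, ?_, ?_, ?_⟩
    · rw [PySem.List.mem_pyRange_one]; omega
    · rw [show (u.length : Int) - (w.length : Int) + 1 - 1
          = (u.length : Int) - (w.length : Int) from by ring]
      exact hg
    · rw [show (u.length : Int) - (w.length : Int) + 1 - 1
          = (u.length : Int) - (w.length : Int) from by ring]
      rw [pvValid_iff, heq]
      exact hw

theorem pvGrow_congr (cs : List Char) (k : Nat) (u : List Bool)
    (hu : 0 < u.length) (hk : u.length + k ≤ cs.length + 1) :
    pvGrow cs pvFA u k = pvGrow cs pvFB u k := by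
  induction k generalizing u with
  | zero => rfl
  | succ k ih =>
    rw [pvGrow, pvGrow, pvStep_eq cs u hu (by omega)]
    exact ih (u ++ [pvFB cs u]) (by simp) (by simp; omega)

-- the whole equivalence, stated over the character list
theorem pvMainList (cs : List Char) :
    (PySem.List.pyRange 0 ((PySem.List.pySetD (List.replicate (cs.length + 1) false) 0 true).length : Int) 1).foldl
      (fun util i => pvAInner cs i util (PySem.List.pyRange 1 (i + 1) 1))
      (PySem.List.pySetD (List.replicate (cs.length + 1) false) 0 true)
    = (PySem.List.pyRange 1 ((cs.length : Int) + 1) 1).foldl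
      (fun util i =>
        util ++ [pvWords.any (fun w =>
          decide ((w.length : Int) ≤ i) &&
          PySem.List.pyGetD util (i - (w.length : Int)) false &&
          (PySem.List.slice cs (some (i - (w.length : Int))) (some i) == w))]) [true] := by
  have hinit : PySem.List.pySetD (List.replicate (cs.length + 1) false) 0 true
      = [true] ++ List.replicate cs.length false := by
    rw [PySem.List.pySetD_of_nonneg _ _ le_rfl]
    simp [List.replicate_succ]
  rw [hinit]
  have hlen0 : ((([true] ++ List.replicate cs.length false).length : Nat) : Int)
      = (cs.length : Int) + 1 := by simp
  rw [hlen0]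
  rw [PySem.List.pyRange_one_cons (by omega), List.foldl_cons]
  have h0 : pvAInner cs 0 ([true] ++ List.replicate cs.length false) (PySem.List.pyRange 1 (0 + 1) 1)
      = [true] ++ List.replicate cs.length false := by
    rw [PySem.List.pyRange_one_eq_nil (by omega)]
    rfl
  rw [h0]
  have hA := pvGrowA cs cs.length [true] (by simp)
  have hB := pvGrowB cs pvFB
      (fun util i =>
        util ++ [pvWords.any (fun w =>
          decide ((w.length : Int) ≤ i) &&
          PySem.List.pyGetD util (i - (w.length : Int)) false &&
          (PySem.List.slice cs (some (i - (w.length : Int))) (some i) == w))])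
      (fun u => rfl) cs.length [true]
  simp only [List.length_cons, List.length_nil] at hA hB
  push_cast at hA hB
  rw [show (0 : Int) + 1 = 1 from by norm_num,
      show (cs.length : Int) + 1 = 1 + (cs.length : Int) from by ring,
      hA, hB]
  exact pvGrow_congr cs cs.length [true] (by simp) (by simp; omega)

-- ===== VERDICT (by name: the statement is the Claim_ definition above) =====
theorem get_word_markers_py_spec : Claim_equal_get_word_markers_py := by
  intro s _
  unfold Spec_get_word_markers_py
  exact pvMainList s.toList
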